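-- pv_equiv track=rewrite | github.com/MicheleArmillotta/LLMproject | snippet_slicer_cpp/enriched_snippets.py | _build_contextual_snippet
-- ===== SOURCE A (Python) =====
-- from typing import List, Dict, Optional, Set
--
-- def _build_contextual_snippet(func: Dict, includes: List[str],
--                           macros: List[str], globals_: List[str],
--                           called_funcs: List[Dict]) -> str:
--     """
--     Costruisce lo snippet contestuale con la struttura richiesta:
--     - includes
--     - macros
--     - globals
--     - container hierarchy
--     - function snippet
--     - called functions (in appended sections)
--     """
--     lines = []
--
--     # 1. Includes
--     if includes:
--         for inc in includes:
--             lines.append(inc)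
--         lines.append("")  # riga vuota
--
--     # 2. Macros
--     if macros:
--         for macro in macros:
--             lines.append(macro)
--         lines.append("")
--
--     # 3. Globals
--     if globals_:
--         for glob in globals_:
--             lines.append(glob if glob.endswith(';') else glob + ';')
--         lines.append("")
--
--     # 4. Container hierarchy + function
--     container = func.get('container')
--     snippet = func['snippet']
--
--     if container:
--         parts = container.split('::')
--         indent = ""
--
--         # apri container
--         for part in parts:
--             lines.append(f"{indent}{part} {{")
--             indent += "  "
--
--         # funzione
--         for line in snippet.split('\n'):
--             lines.append(f"{indent}{line}")
--
--         # chiudi container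
--         for _ in range(len(parts)):
--             indent = indent[:-2]
--             lines.append(f"{indent}}}")
--
--     else:
--         lines.append(snippet)
--
--
--     return "\n".join(lines)
-- ===== SOURCE B (Python) =====
-- def _build_contextual_snippet(func, includes, macros, globals_, called_funcs):
--     # Assemble the output as a list of sections, building the container block
--     # inside-out: start from the snippet body and wrap it with each container
--     # part from innermost to outermost (prepend header, indent, append brace).
--     sections = []
--     if includes:
--         sections.append(includes + [""])
--     if macros:
--         sections.append(macros + [""])
--     if globals_:
--         sections.append([g if g.endswith(';') else g + ';' for g in globals_] + [""])
--
--     container = func.get('container')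
--     snippet = func['snippet']
--     if container:
--         block = snippet.split('\n')
--         for part in reversed(container.split('::')):
--             block = [part + " {"] + ["  " + line for line in block] + ["}"]
--         sections.append(block)
--     else:
--         sections.append([snippet])
--
--     return "\n".join(line for sec in sections for line in sec)
-- ===== Notes on version B (the rewrite author's own statement) =====
-- stated objective: alternative
-- what changed: Replaces the single mutable lines/indent accumulator (open all containers forward, track an indent string, close with indent slicing) by a section-list build whose container block is constructed inside-out: the body is wrapped by each container part in reverse, indenting the accumulated block at each wrap, with no indent-string state at all.
import Mathlib
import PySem

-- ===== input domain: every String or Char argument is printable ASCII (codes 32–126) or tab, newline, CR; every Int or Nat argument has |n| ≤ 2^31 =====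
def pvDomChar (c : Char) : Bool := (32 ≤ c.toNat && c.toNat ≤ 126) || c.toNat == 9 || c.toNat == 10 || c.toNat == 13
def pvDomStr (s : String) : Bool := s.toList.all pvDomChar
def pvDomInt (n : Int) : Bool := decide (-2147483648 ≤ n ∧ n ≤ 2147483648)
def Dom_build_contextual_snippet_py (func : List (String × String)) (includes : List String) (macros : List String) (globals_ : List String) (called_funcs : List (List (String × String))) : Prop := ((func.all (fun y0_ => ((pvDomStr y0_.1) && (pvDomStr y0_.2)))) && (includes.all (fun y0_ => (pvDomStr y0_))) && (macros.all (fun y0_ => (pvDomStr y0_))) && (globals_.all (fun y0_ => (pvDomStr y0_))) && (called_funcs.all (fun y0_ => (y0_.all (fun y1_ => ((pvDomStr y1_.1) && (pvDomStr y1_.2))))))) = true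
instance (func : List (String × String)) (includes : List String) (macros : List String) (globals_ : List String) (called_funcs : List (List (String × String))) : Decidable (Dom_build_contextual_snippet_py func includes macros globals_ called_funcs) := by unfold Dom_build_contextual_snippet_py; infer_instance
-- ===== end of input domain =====

-- B rebuilds the output as a flattened list of sections, constructing the container block inside-out
-- (wrap the body with each container part in reverse) instead of A's forward open/indent/close pass
-- with a mutable indent string; alternative decomposition, not claimed faster.
-- Pre_ excludes inputs whose func dict has no 'snippet' key: there the Python A raises KeyError (and so does B).


-- ===== PORT A =====
-- the container-opening loop: state is (lines, indent)
def pvAOpen (parts : List String) (st : List String × String) : List String × String :=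
  parts.foldl (fun st part => (st.1 ++ [st.2 ++ part ++ " {"], st.2 ++ "  ")) st

-- the container-closing loop: 'for _ in range(n): indent = indent[:-2]; lines.append(indent + "}")'
def pvAClose (n : Nat) (st : List String × String) : List String × String :=
  (List.range n).foldl (fun st _ =>
    let indent := PySem.Str.slice st.2 none (some (-2))
    (st.1 ++ [indent ++ "}"], indent)) st

def build_contextual_snippet_py (func : List (String × String)) (includes : List String) (macros : List String) (globals_ : List String) (called_funcs : List (List (String × String))) : String :=
  let lines : List String := []
  let lines := if includes ≠ [] then includes.foldl (fun l inc => l ++ [inc]) lines ++ [""] else lines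
  let lines := if macros ≠ [] then macros.foldl (fun l macro_ => l ++ [macro_]) lines ++ [""] else lines
  let lines := if globals_ ≠ [] then
      globals_.foldl (fun l glob => l ++ [if PySem.Str.endswith glob ";" then glob else glob ++ ";"]) lines ++ [""]
    else lines
  let container := (PySem.Dict.mk func).get? "container"
  let snippet := ((PySem.Dict.mk func).get? "snippet").getD ""   -- Pre_ guarantees the key is present
  let lines :=
    match container with
    | some c =>
      if c ≠ "" then
        let parts := (PySem.Str.split? c "::").getD []           -- sep ≠ "", so split? is some
        let st := pvAOpen parts (lines, "")
        let lines2 := ((PySem.Str.split? snippet "\n").getD []).foldl (fun l line => l ++ [st.2 ++ line]) st.1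
        (pvAClose parts.length (lines2, st.2)).1
      else lines ++ [snippet]
    | none => lines ++ [snippet]
  PySem.Str.join "\n" lines

-- ===== PORT B =====
-- wrap the accumulated block with one container part per step, innermost first
def pvWrap (parts : List String) (body : List String) : List String :=
  parts.foldr (fun part block => (part ++ " {") :: block.map (fun line => "  " ++ line) ++ ["}"]) body

def build_contextual_snippet_py_alt (func : List (String × String)) (includes : List String) (macros : List String) (globals_ : List String) (called_funcs : List (List (String × String))) : String :=
  let sections : List (List String) := []
  let sections := if includes ≠ [] then sections ++ [includes ++ [""]] else sections
  let sections := if macros ≠ [] then sections ++ [macros ++ [""]] else sections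
  let sections := if globals_ ≠ [] then
      sections ++ [globals_.map (fun glob => if PySem.Str.endswith glob ";" then glob else glob ++ ";") ++ [""]]
    else sections
  let container := (PySem.Dict.mk func).get? "container"
  let snippet := ((PySem.Dict.mk func).get? "snippet").getD ""
  let sections :=
    match container with
    | some c =>
      if c ≠ "" then
        sections ++ [pvWrap ((PySem.Str.split? c "::").getD []) ((PySem.Str.split? snippet "\n").getD [])]
      else sections ++ [[snippet]]
    | none => sections ++ [[snippet]]
  PySem.Str.join "\n" sections.flatten

-- ===== PRECONDITION & SPEC =====
-- Pre_ excludes exactly the inputs where func has no 'snippet' key: A raises KeyError there.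
def Pre_build_contextual_snippet_py (func : List (String × String)) (includes : List String) (macros : List String) (globals_ : List String) (called_funcs : List (List (String × String))) : Prop :=
  "snippet" ∈ func.map Prod.fst
instance (func : List (String × String)) (includes : List String) (macros : List String) (globals_ : List String) (called_funcs : List (List (String × String))) : Decidable (Pre_build_contextual_snippet_py func includes macros globals_ called_funcs) := by unfold Pre_build_contextual_snippet_py; infer_instance

def pvWitness_build_contextual_snippet_py : (List (String × String)) × List String × List String × List String × (List (List (String × String))) :=
  ([("snippet", "int f() { return 0; }"), ("container", "A::B")], ["#include <x.h>"], [], ["int g"], [])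

def Spec_build_contextual_snippet_py (func : List (String × String)) (includes : List String) (macros : List String) (globals_ : List String) (called_funcs : List (List (String × String))) (out : String) : Prop := out = build_contextual_snippet_py_alt func includes macros globals_ called_funcs
instance (func : List (String × String)) (includes : List String) (macros : List String) (globals_ : List String) (called_funcs : List (List (String × String))) (out : String) : Decidable (Spec_build_contextual_snippet_py func includes macros globals_ called_funcs out) := by unfold Spec_build_contextual_snippet_py; infer_instance

-- ===== CLAIM (what is proved, stated in full; the proofs are below) =====
def Claim_equal_build_contextual_snippet_py : Prop := ∀ (func : List (String × String)) (includes : List String) (macros : List String) (globals_ : List String) (called_funcs : List (List (String × String))), Dom_build_contextual_snippet_py func includes macros globals_ called_funcs → Pre_build_contextual_snippet_py func includes macros globals_ called_funcs → Spec_build_contextual_snippet_py func includes macros globals_ called_funcs (build_contextual_snippet_py func includes macros globals_ called_funcs)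

-- ===== LEMMAS AND PROOFS =====

theorem pvWitness_ok :
    Dom_build_contextual_snippet_py (pvWitness_build_contextual_snippet_py.1) (pvWitness_build_contextual_snippet_py.2.1) (pvWitness_build_contextual_snippet_py.2.2.1) (pvWitness_build_contextual_snippet_py.2.2.2.1) (pvWitness_build_contextual_snippet_py.2.2.2.2) ∧
    Pre_build_contextual_snippet_py (pvWitness_build_contextual_snippet_py.1) (pvWitness_build_contextual_snippet_py.2.1) (pvWitness_build_contextual_snippet_py.2.2.1) (pvWitness_build_contextual_snippet_py.2.2.2.1) (pvWitness_build_contextual_snippet_py.2.2.2.2) := by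
  decide

-- stripping the two spaces that the opening loop appended restores the previous indent
theorem pv_slice_drop2 (s : String) : PySem.Str.slice (s ++ "  ") none (some (-2)) = s := by
  rw [← String.toList_inj, PySem.Str.toList_slice, PySem.Chars.slice_eq_listSlice,
      PySem.List.slice_to_neg_ofNat _ 2 (by omega)]
  simp

-- one more closing iteration peels off the last range element
theorem pvAClose_succ (n : Nat) (st : List String × String) :
    pvAClose (n + 1) st =
      ((pvAClose n st).1 ++ [PySem.Str.slice (pvAClose n st).2 none (some (-2)) ++ "}"],
       PySem.Str.slice (pvAClose n st).2 none (some (-2))) := by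
  simp [pvAClose, List.range_succ]

-- A's forward open/body/close pass equals B's inside-out wrap, shifted by the ambient indent
theorem pv_container_pair (parts : List String) : ∀ (ind : String) (lines body : List String),
    pvAClose parts.length
      ((pvAOpen parts (lines, ind)).1 ++ body.map (fun line => (pvAOpen parts (lines, ind)).2 ++ line),
       (pvAOpen parts (lines, ind)).2)
    = (lines ++ (pvWrap parts body).map (fun line => ind ++ line), ind) := by
  induction parts with
  | nil =>
    intro ind lines body
    simp only [pvAOpen, List.foldl_nil, pvAClose, List.length_nil, List.range_zero, pvWrap, List.foldr_nil]
  | cons p ps ih =>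
    intro ind lines body
    have hopen : pvAOpen (p :: ps) (lines, ind) = pvAOpen ps (lines ++ [ind ++ p ++ " {"], ind ++ "  ") := by
      simp [pvAOpen]
    rw [hopen, List.length_cons, pvAClose_succ, ih (ind ++ "  ") (lines ++ [ind ++ p ++ " {"]) body]
    simp [pv_slice_drop2, pvWrap, List.map_map, Function.comp, String.append_assoc]

theorem pv_container_eq (parts : List String) (ind : String) (lines body : List String) :
    (pvAClose parts.length
      ((pvAOpen parts (lines, ind)).1 ++ body.map (fun line => (pvAOpen parts (lines, ind)).2 ++ line),
       (pvAOpen parts (lines, ind)).2)).1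
    = lines ++ (pvWrap parts body).map (fun line => ind ++ line) := by
  rw [pv_container_pair]

-- ===== VERDICT (by name: the statement is the Claim_ definition above) =====
theorem build_contextual_snippet_py_spec : Claim_equal_build_contextual_snippet_py := by
  intro func includes macros globals_ called_funcs _ _
  show build_contextual_snippet_py func includes macros globals_ called_funcs = build_contextual_snippet_py_alt func includes macros globals_ called_funcs
  unfold build_contextual_snippet_py build_contextual_snippet_py_alt
  simp only [PySem.List.foldl_append_singleton, PySem.List.foldl_append_singleton_eq_map]
  by_cases hi : includes = [] <;> by_cases hm : macros = [] <;> by_cases hg : globals_ = [] <;>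
    cases hc : (PySem.Dict.mk func).get? "container" with
  | none => simp [hi, hm, hg]
  | some c =>
    by_cases hce : c = "" <;>
      simp [hi, hm, hg, hce, pv_container_eq, String.empty_append]
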